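-- pv_equiv track=rewrite | github.com/Melrydin/AdventOfCode | 2024/09/DayNine.py | memorySwap
-- ===== SOURCE A (Python) =====
-- def memorySwap(decodeMemory: list[str]) -> list[str]:
--     lastIndex = len(decodeMemory) - 1
--     for i in range(len(decodeMemory)):
--         if decodeMemory[i] != ".":
--             continue
--         while lastIndex >= 0 and decodeMemory[lastIndex] == ".":
--             lastIndex -= 1
--         if lastIndex <= i:
--             break
--         decodeMemory[i] = decodeMemory[lastIndex]
--         decodeMemory[lastIndex] = "."
--     return decodeMemory
-- ===== SOURCE B (Python) =====
-- def memorySwap(decodeMemory: list[str]) -> list[str]: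
--     nonDots = [c for c in decodeMemory if c != "."]
--     m = len(nonDots)
--     fill = reversed(nonDots)
--     # next(fill) is never exhausted: the first m slots hold at most m dots
--     head = [next(fill) if c == "." else c for c in decodeMemory[:m]]
--     decodeMemory[:] = head + ["."] * (len(decodeMemory) - m)
--     return decodeMemory
-- ===== Notes on version B (the rewrite author's own statement) =====
-- stated objective: simpler
-- what changed: B replaces A's in-place two-pointer scan (forward index, backward skip-dots pointer, early break) by: collect the non-dot entries once, rebuild the first m slots in one forward pass filling each dot from the reversed non-dot list, and pad the rest with dots.
import Mathlib
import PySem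

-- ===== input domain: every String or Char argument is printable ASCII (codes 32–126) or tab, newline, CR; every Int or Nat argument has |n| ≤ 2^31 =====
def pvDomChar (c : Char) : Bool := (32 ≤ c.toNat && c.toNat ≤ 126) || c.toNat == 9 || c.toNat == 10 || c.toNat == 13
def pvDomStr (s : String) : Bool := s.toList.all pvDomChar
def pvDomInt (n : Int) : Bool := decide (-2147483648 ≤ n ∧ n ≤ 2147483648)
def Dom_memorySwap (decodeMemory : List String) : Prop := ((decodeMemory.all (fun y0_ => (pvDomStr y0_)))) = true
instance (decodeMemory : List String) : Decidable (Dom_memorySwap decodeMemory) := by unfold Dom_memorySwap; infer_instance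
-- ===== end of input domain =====

-- B compacts by collecting the non-dot entries once and filling the dots of the first
-- m slots from the reversed non-dot list in one forward pass, instead of A's in-place
-- two-pointer scan (simpler decomposition, same cost). In Python both A and B mutate
-- the argument list in place; the theorems here are about the returned value.

-- ===== PORT A =====
def skipDotsA (ys : List String) : Nat → Int
  | 0 => if ys.getD 0 "." == "." then -1 else 0
  | k+1 => if ys.getD (k+1) "." == "." then skipDotsA ys k else ((k : Int) + 1)

-- the `for i in range(len(decodeMemory))` loop; `break` returns ys as it stands.
-- All list reads in A's executions are in range, so `getD` with a dummy default is exact.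
def loopA (ys : List String) (last : Int) (i n : Nat) : List String :=
  if _h : i < n then
    if ys.getD i "." ≠ "." then loopA ys last (i+1) n
    else
      let l : Int := if last < 0 then last else skipDotsA ys last.toNat
      if l ≤ (i : Int) then ys
      else
        loopA ((ys.set i (ys.getD l.toNat ".")).set l.toNat ".") l (i+1) n
  else ys
termination_by n - i

def memorySwap (decodeMemory : List String) : List String :=
  loopA decodeMemory ((decodeMemory.length : Int) - 1) 0 decodeMemory.length

-- ===== PORT B =====


-- the `[next(fill) if c == "." else c for c in decodeMemory[:m]]` comprehension of Source B,
-- consuming the reversed non-dot list from the front (= `next(fill)` = headD + drop 1).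
-- `fill` is never exhausted when read (the first m slots hold at most m dots), so the
-- `headD` default is unreachable.
def fillHead : List String → List String → List String
  | [], _ => []
  | c :: t, fs => if c == "." then fs.headD "." :: fillHead t (fs.drop 1) else c :: fillHead t fs

def memorySwap_alt (decodeMemory : List String) : List String :=
  let nonDots := decodeMemory.filter (fun c => c != ".")
  let m := nonDots.length
  let filler := nonDots.reverse
  fillHead (decodeMemory.take m) filler ++ List.replicate (decodeMemory.length - m) "."

-- ===== PRECONDITION & SPEC =====
def Spec_memorySwap (decodeMemory : List String) (out : List String) : Prop := out = memorySwap_alt decodeMemory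
instance (decodeMemory : List String) (out : List String) : Decidable (Spec_memorySwap decodeMemory out) := by unfold Spec_memorySwap; infer_instance

-- ===== CLAIM (what is proved, stated in full; the proofs are below) =====
def Claim_equal_memorySwap : Prop := ∀ (decodeMemory : List String), Dom_memorySwap decodeMemory → Spec_memorySwap decodeMemory (memorySwap decodeMemory)

-- ===== LEMMAS AND PROOFS =====

theorem fillHead_append_extra (t : List String) : ∀ (fs gs : List String),
    t.countP (fun c => c == ".") ≤ fs.length →
    fillHead t (fs ++ gs) = fillHead t fs := by
  induction t with
  | nil => intro fs gs h; simp [fillHead]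
  | cons c t ih =>
    intro fs gs h
    by_cases hc : c == "."
    · rw [List.countP_cons_of_pos (p := fun c => c == ".") hc] at h
      cases fs with
      | nil => simp at h
      | cons f fs' =>
        simp only [fillHead, hc, if_pos, List.cons_append, List.headD_cons, List.drop_one,
          List.tail_cons]
        rw [ih fs' gs (by simpa using h)]
    · rw [List.countP_cons_of_neg (p := fun c => c == ".") (by simpa using hc)] at h
      simp only [fillHead, hc, if_neg, Bool.false_eq_true, not_false_iff]
      rw [ih fs gs h]

theorem fillHead_cons_nondot (c : String) (t fs : List String) (hb : (c == ".") = false) :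
    fillHead (c :: t) fs = c :: fillHead t fs := by
  simp [fillHead, hb]

theorem fillHead_cons_dot (t : List String) (f : String) (fs : List String) :
    fillHead ("." :: t) (f :: fs) = f :: fillHead t fs := by
  simp [fillHead]

theorem spec_cons_nondot (c : String) (r : List String) (hc : c ≠ ".") :
    memorySwap_alt (c :: r) = c :: memorySwap_alt r := by
  have hb : (c == ".") = false := by simpa using hc
  simp only [memorySwap_alt, List.filter_cons, hb, bne, Bool.not_false, if_pos,
    List.length_cons, List.reverse_cons, List.take_succ_cons]
  rw [fillHead_cons_nondot _ _ _ hb]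
  rw [fillHead_append_extra _ _ _ (by
    calc (List.take (r.filter (fun c => c != ".")).length r).countP (fun c => c == ".")
        ≤ (List.take (r.filter (fun c => c != ".")).length r).length := List.countP_le_length
      _ ≤ (r.filter (fun c => c != ".")).length := by simp
      _ = (r.filter (fun c => c != ".")).reverse.length := by simp)]
  simp [Nat.succ_sub_succ]

theorem spec_all_dots (r : List String) (h : ∀ x ∈ r, x = ".") :
    memorySwap_alt r = r := by
  have hf : r.filter (fun c => c != ".") = [] := by
    rw [List.filter_eq_nil_iff]; intro a ha; simp [h a ha]
  simp only [memorySwap_alt, hf, List.length_nil, List.take_zero, List.reverse_nil,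
    fillHead, List.nil_append, Nat.sub_zero]
  exact (List.eq_replicate_of_mem h).symm

theorem spec_dot_step (a b : List String) (v : String) (hv : v ≠ ".")
    (hb : ∀ x ∈ b, x = ".") :
    memorySwap_alt ("." :: (a ++ v :: b)) = v :: memorySwap_alt (a ++ "." :: b) := by
  have hvb : (v == ".") = false := by simpa using hv
  have hfb : b.filter (fun c => c != ".") = [] := by
    rw [List.filter_eq_nil_iff]; intro x hx; simp [hb x hx]
  have hfilter : (a ++ v :: b).filter (fun c => c != ".") =
      a.filter (fun c => c != ".") ++ [v] := by
    simp [List.filter_append, List.filter_cons, hv, hfb]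
  have hfilter' : (a ++ "." :: b).filter (fun c => c != ".") =
      a.filter (fun c => c != ".") := by
    simp [List.filter_append, hfb]
  have hk : (a.filter (fun c => c != ".")).length ≤ a.length := List.length_filter_le _ _
  have htake : ∀ (z : List String), List.take (a.filter (fun c => c != ".")).length (a ++ z)
      = List.take (a.filter (fun c => c != ".")).length a :=
    fun z => List.take_append_of_le_length hk
  simp only [memorySwap_alt, List.filter_cons, hfilter, hfilter', List.length_append,
    List.length_cons, List.take_succ_cons, htake]
  rw [show ((".":String) != ".") = false by simp]
  simp only [if_neg, Bool.false_eq_true, not_false_iff]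
  rw [show (List.filter (fun c => c != ".") a ++ [v]).length
      = (List.filter (fun c => c != ".") a).length + 1 by simp]
  rw [List.take_succ_cons, htake (v :: b), List.reverse_append, List.reverse_cons, List.reverse_nil,
    List.nil_append, List.singleton_append, fillHead_cons_dot, List.cons_append]
  simp [Nat.succ_sub_succ]

theorem skipDotsA_props (ys : List String) (k : Nat) :
    -1 ≤ skipDotsA ys k ∧ skipDotsA ys k ≤ (k : Int) ∧
    (∀ j : Nat, skipDotsA ys k < (j : Int) → j ≤ k → ys.getD j "." = ".") ∧
    (0 ≤ skipDotsA ys k → ys.getD (skipDotsA ys k).toNat "." ≠ ".") := by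
  induction k with
  | zero =>
    by_cases h : ys.getD 0 "." == "."
    · simp only [skipDotsA, h, if_pos]
      refine ⟨by omega, by omega, ?_, by intro h0; omega⟩
      intro j hj hj0; interval_cases j; exact eq_of_beq h
    · simp only [skipDotsA, h, if_neg, Bool.false_eq_true, not_false_iff]
      refine ⟨by omega, by omega, ?_, ?_⟩
      · intro j hj hj0; omega
      · intro _; simpa using h
  | succ k ih =>
    by_cases h : ys.getD (k+1) "." == "."
    · obtain ⟨ih1, ih2, ih3, ih4⟩ := ih
      refine ⟨?_, ?_, ?_, ?_⟩ <;> simp only [skipDotsA, h, if_pos]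
      · exact ih1
      · omega
      · intro j hj hjk
        rcases Nat.lt_or_ge j (k+1) with hlt | hge
        · exact ih3 j hj (by omega)
        · have : j = k+1 := by omega
          subst this; exact eq_of_beq h
      · exact ih4
    · refine ⟨?_, ?_, ?_, ?_⟩ <;> simp only [skipDotsA, h, if_neg, Bool.false_eq_true, not_false_iff]
      · omega
      · omega
      · intro j hj hjk; omega
      · intro _
        have : ((k:Int)+1).toNat = k+1 := by omega
        rw [this]; simpa using h

-- small getD/set helpers
theorem getD_set_ne (zs : List String) (m j : Nat) (a : String) (h : j ≠ m) :
    (zs.set m a).getD j "." = zs.getD j "." := by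
  simp [List.getD_eq_getElem?_getD, List.getElem?_set_ne (Ne.symm h)]

theorem getD_eq_getElem (zs : List String) (j : Nat) (h : j < zs.length) :
    zs.getD j "." = zs[j] := by
  simp [List.getD_eq_getElem?_getD, List.getElem?_eq_getElem h]

theorem spec_nil : memorySwap_alt [] = [] := by
  simp [memorySwap_alt, fillHead]

theorem loopA_eq (fuel : Nat) : ∀ (n : Nat) (ys : List String) (last : Int) (i : Nat),
    n - i ≤ fuel → ys.length = n → i ≤ n → -1 ≤ last → last < (n : Int) →
    (∀ j : Nat, last < (j : Int) → j < n → ys.getD j "." = ".") →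
    loopA ys last i n = ys.take i ++ memorySwap_alt (ys.drop i) := by
  induction fuel with
  | zero =>
    intro n ys last i hfuel hlen hi hl1 hl2 hdots
    have hin : i = n := by omega
    subst hin
    rw [loopA, dif_neg (by omega)]
    rw [← hlen, List.drop_length, spec_nil, List.take_length, List.append_nil]
  | succ fuel ih =>
    intro n ys last i hfuel hlen hi hl1 hl2 hdots
    by_cases hin : i < n
    · rw [loopA, dif_pos hin]
      have hidx : i < ys.length := by omega
      have hgd : ys.getD i "." = ys[i] := getD_eq_getElem ys i hidx
      have hdropi : ys.drop i = ys[i] :: ys.drop (i+1) := List.drop_eq_getElem_cons hidx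
      by_cases hc : ys.getD i "." ≠ "."
      · rw [if_pos hc]
        rw [ih n ys last (i+1) (by omega) hlen (by omega) hl1 hl2 hdots]
        rw [hdropi, spec_cons_nondot _ _ (hgd ▸ hc)]
        rw [show List.take (i+1) ys = List.take i ys ++ [ys[i]] by
          rw [List.take_add_one, List.getElem?_eq_getElem hidx]; rfl]
        rw [List.append_assoc, List.singleton_append]
      · rw [if_neg hc]
        push_neg at hc
        have hlprops : -1 ≤ (if last < 0 then last else skipDotsA ys last.toNat) ∧
            (if last < 0 then last else skipDotsA ys last.toNat) ≤ last ∧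
            (∀ j : Nat, (if last < 0 then last else skipDotsA ys last.toNat) < (j : Int) →
              j < n → ys.getD j "." = ".") ∧
            (0 ≤ (if last < 0 then last else skipDotsA ys last.toNat) →
              ys.getD (if last < 0 then last else skipDotsA ys last.toNat).toNat "." ≠ ".") := by
          by_cases hneg : last < 0
          · rw [if_pos hneg]
            exact ⟨hl1, le_refl _, fun j hj hjn => hdots j hj hjn, fun h0 => absurd h0 (by omega)⟩
          · rw [if_neg hneg]
            obtain ⟨p1, p2, p3, p4⟩ := skipDotsA_props ys last.toNat
            refine ⟨p1, by omega, ?_, p4⟩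
            intro j hj hjn
            rcases (by omega : (j : Int) ≤ last ∨ last < (j : Int)) with hle | hgt
            · exact p3 j hj (by omega)
            · exact hdots j hgt hjn
        set l : Int := if last < 0 then last else skipDotsA ys last.toNat with hldef
        obtain ⟨q1, q2, q3, q4⟩ := hlprops
        by_cases hbr : l ≤ (i : Int)
        · rw [if_pos hbr]
          have hli : l < (i : Int) := by
            rcases lt_or_eq_of_le hbr with h | h
            · exact h
            · exfalso
              apply q4 (by omega)
              rw [h, Int.toNat_natCast]
              exact hc
          have hall : ∀ x ∈ ys.drop i, x = "." := by
            intro x hx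
            rw [List.mem_iff_getElem] at hx
            obtain ⟨j, hj, hxeq⟩ := hx
            have hlend : (ys.drop i).length = n - i := by simp [hlen]
            have hij : i + j < n := by omega
            have hdot := q3 (i+j) (by omega) hij
            rw [getD_eq_getElem _ _ (by omega)] at hdot
            rw [← hxeq, List.getElem_drop]
            exact hdot
          rw [spec_all_dots _ hall, List.take_append_drop]
        · rw [if_neg hbr]
          have hl0 : 0 ≤ l := by omega
          have hlni : i < l.toNat := by omega
          have hlnn : l.toNat < n := by omega
          have hvne : ys.getD l.toNat "." ≠ "." := q4 hl0
          rw [ih n ((ys.set i (ys.getD l.toNat ".")).set l.toNat ".") l (i+1)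
            (by omega) (by simp [hlen]) (by omega) (by omega) (by omega)
            (by
              intro j hj hjn
              have hji : j ≠ i := by omega
              have hjl : j ≠ l.toNat := by omega
              rw [getD_set_ne _ _ _ _ hjl, getD_set_ne _ _ _ _ hji]
              exact q3 j hj hjn)]
          -- list algebra
          set v := ys.getD l.toNat "." with hvdef
          set ln := l.toNat with hlndef
          have hlnys : ln < ys.length := by omega
          have hvval : v = ys[ln] := by rw [hvdef, getD_eq_getElem _ _ hlnys]
          -- take (i+1) of the doubly-set list
          have htake1 : ((ys.set i v).set ln ".").take (i+1) = ys.take i ++ [v] := by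
            rw [List.take_set, List.set_eq_of_length_le (by simp; omega), List.take_set]
            rw [show List.take (i+1) ys = List.take i ys ++ [ys[i]] by
              rw [List.take_add_one, List.getElem?_eq_getElem hidx]; rfl]
            rw [List.set_append_right _ _ (by simp [List.length_take])]
            simp [List.length_take, Nat.min_eq_left (le_of_lt hidx)]
          have hdrop1 : ((ys.set i v).set ln ".").drop (i+1) =
              (ys.drop (i+1)).set (ln - (i+1)) "." := by
            rw [List.drop_set, if_neg (by omega), List.drop_set, if_pos (by omega)]
          rw [htake1, hdrop1]
          -- decompose r := ys.drop (i+1) at position p := ln - (i+1)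
          have hrlen : (ys.drop (i+1)).length = n - (i+1) := by simp [hlen]
          have hp : ln - (i+1) < (ys.drop (i+1)).length := by omega
          have hrget : (ys.drop (i+1))[ln - (i+1)]'hp = ys[ln]'hlnys := by
            simp only [List.getElem_drop]
            congr 1
            omega
          have hrdec : ys.drop (i+1) = (ys.drop (i+1)).take (ln - (i+1)) ++
              v :: (ys.drop (i+1)).drop (ln - (i+1) + 1) := by
            conv_lhs => rw [← List.take_append_drop (ln - (i+1)) (ys.drop (i+1))]
            rw [List.drop_eq_getElem_cons hp, hrget, hvval]
          have hrset : (ys.drop (i+1)).set (ln - (i+1)) "." =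
              (ys.drop (i+1)).take (ln - (i+1)) ++ "." :: (ys.drop (i+1)).drop (ln - (i+1) + 1) := by
            rw [List.set_eq_take_append_cons_drop, if_pos hp]
          have hbdots : ∀ x ∈ (ys.drop (i+1)).drop (ln - (i+1) + 1), x = "." := by
            intro x hx
            rw [List.mem_iff_getElem] at hx
            obtain ⟨j, hj, hxeq⟩ := hx
            have hjlen : ln + 1 + j < n := by
              have := hj; simp [hrlen] at this; omega
            have := q3 (ln + 1 + j) (by omega) hjlen
            rw [getD_eq_getElem _ _ (by omega)] at this
            rw [← hxeq, List.getElem_drop, List.getElem_drop]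
            convert this using 2
            omega
          have hdropi' : ys.drop i = "." :: ys.drop (i+1) := by
            rw [hdropi, show ys[i] = "." by rw [← hgd]; exact hc]
          rw [hdropi']
          conv_rhs => rw [hrdec]
          rw [spec_dot_step _ _ _ hvne hbdots, hrset]
          simp
    · rw [loopA, dif_neg hin]
      have hin' : i = n := by omega
      subst hin'
      rw [← hlen, List.drop_length, spec_nil, List.take_length, List.append_nil]

-- ===== VERDICT (by name: the statement is the Claim_ definition above) =====
theorem memorySwap_spec : Claim_equal_memorySwap := by
  intro xs _
  unfold Spec_memorySwap memorySwap
  have := loopA_eq xs.length xs.length xs ((xs.length : Int) - 1) 0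
    (by omega) rfl (Nat.zero_le _) (by omega) (by omega)
    (by intro j hj hjn; omega)
  simpa using this
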